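-- pv_equiv track=rewrite | github.com/AxWise-GmbH/axwise-flow | backend/services/processing/persona_formation_service.py | generate_evidence_based_description
-- ===== SOURCE A (Python) =====
-- def generate_evidence_based_description(
--     trait_name: str, evidence_text: str, persona_name: str
-- ) -> str:
--     """
--     Generate a trait description that closely aligns with available evidence.
--
--     Args:
--         trait_name: Name of the trait
--         evidence_text: Available evidence text
--         persona_name: Name of the persona
--
--     Returns:
--         Evidence-based trait description
--     """
--     if not evidence_text or len(evidence_text.strip()) < 20:
--         return ""
--
--     # Simple evidence-based description generation
--     # Extract key themes from evidence
--     evidence_lower = evidence_text.lower()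
--
--     # Common patterns for different traits
--     if trait_name == "demographics":
--         if any(
--             term in evidence_lower for term in ["work", "job", "company", "business"]
--         ):
--             return "Professional working in a business environment"
--         elif any(
--             term in evidence_lower
--             for term in ["student", "school", "university", "college"]
--         ):
--             return "Student or academic professional"
--         else:
--             return "Individual with varied background and experience"
--
--     elif trait_name == "goals_and_motivations":
--         if any(
--             term in evidence_lower for term in ["want", "need", "goal", "hope", "aim"]
--         ):
--             return "Focused on achieving specific objectives and meeting personal needs"
--         else:
--             return "Motivated by practical outcomes and problem-solving"
--
--     elif trait_name == "challenges_and_frustrations":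
--         if any(
--             term in evidence_lower
--             for term in ["problem", "issue", "difficult", "hard", "frustrating"]
--         ):
--             return "Faces specific challenges that impact daily activities"
--         else:
--             return "Encounters occasional obstacles in workflow"
--
--     else:
--         # Generic evidence-based description
--         return f"Demonstrates specific patterns and behaviors related to {trait_name.replace('_', ' ')}"
-- ===== SOURCE B (Python) =====
-- # Single reverse pass over a flat (trait, term, description) rule list with an
-- # overwrite accumulator: no grouping, no per-group short-circuit; earliest rule
-- # wins because later (lower-priority) matches are overwritten by earlier ones.
-- _RULES = [
--     ("demographics", "work", "Professional working in a business environment"),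
--     ("demographics", "job", "Professional working in a business environment"),
--     ("demographics", "company", "Professional working in a business environment"),
--     ("demographics", "business", "Professional working in a business environment"),
--     ("demographics", "student", "Student or academic professional"),
--     ("demographics", "school", "Student or academic professional"),
--     ("demographics", "university", "Student or academic professional"),
--     ("demographics", "college", "Student or academic professional"),
--     ("goals_and_motivations", "want", "Focused on achieving specific objectives and meeting personal needs"),
--     ("goals_and_motivations", "need", "Focused on achieving specific objectives and meeting personal needs"),
--     ("goals_and_motivations", "goal", "Focused on achieving specific objectives and meeting personal needs"),
--     ("goals_and_motivations", "hope", "Focused on achieving specific objectives and meeting personal needs"),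
--     ("goals_and_motivations", "aim", "Focused on achieving specific objectives and meeting personal needs"),
--     ("challenges_and_frustrations", "problem", "Faces specific challenges that impact daily activities"),
--     ("challenges_and_frustrations", "issue", "Faces specific challenges that impact daily activities"),
--     ("challenges_and_frustrations", "difficult", "Faces specific challenges that impact daily activities"),
--     ("challenges_and_frustrations", "hard", "Faces specific challenges that impact daily activities"),
--     ("challenges_and_frustrations", "frustrating", "Faces specific challenges that impact daily activities"),
-- ]
--
-- _DEFAULTS = {
--     "demographics": "Individual with varied background and experience",
--     "goals_and_motivations": "Motivated by practical outcomes and problem-solving",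
--     "challenges_and_frustrations": "Encounters occasional obstacles in workflow",
-- }
--
--
-- def generate_evidence_based_description(
--     trait_name: str, evidence_text: str, persona_name: str
-- ) -> str:
--     if not evidence_text or len(evidence_text.strip()) < 20:
--         return ""
--     if trait_name not in _DEFAULTS:
--         return f"Demonstrates specific patterns and behaviors related to {trait_name.replace('_', ' ')}"
--     evidence_lower = evidence_text.lower()
--     best = _DEFAULTS[trait_name]
--     for trait, term, desc in reversed(_RULES):
--         if trait == trait_name and term in evidence_lower:
--             best = desc
--     return best
-- ===== Notes on version B (the rewrite author's own statement) =====
-- stated objective: alternative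
-- what changed: Replaced the per-trait if/elif chain of short-circuiting any() group checks with a single exhaustive reverse pass over a flat (trait, term, description) rule list using an overwrite accumulator, so the earliest matching rule wins without grouping or early exit.
import Mathlib
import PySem

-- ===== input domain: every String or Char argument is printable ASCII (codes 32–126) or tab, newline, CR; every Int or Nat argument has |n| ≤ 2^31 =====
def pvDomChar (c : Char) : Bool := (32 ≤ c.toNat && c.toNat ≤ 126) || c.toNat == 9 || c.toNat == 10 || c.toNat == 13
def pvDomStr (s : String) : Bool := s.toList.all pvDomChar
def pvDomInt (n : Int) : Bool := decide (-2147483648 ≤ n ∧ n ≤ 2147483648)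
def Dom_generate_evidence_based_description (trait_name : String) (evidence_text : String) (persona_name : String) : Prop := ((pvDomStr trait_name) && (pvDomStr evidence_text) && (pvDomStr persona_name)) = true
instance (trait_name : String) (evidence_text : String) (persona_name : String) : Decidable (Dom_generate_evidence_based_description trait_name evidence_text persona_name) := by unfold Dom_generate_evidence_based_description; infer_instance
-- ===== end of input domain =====

-- B replaces A's per-trait if/elif chain of short-circuiting any() checks by one exhaustive reverse pass over a flat (trait, term, description) rule list with an overwrite accumulator; same return value, persona_name unused by both.
-- ===== PORT A =====
-- Transliteration of A's if/elif chain; persona_name is unused by A.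
def generate_evidence_based_description (trait_name : String) (evidence_text : String) (persona_name : String) : String :=
  if evidence_text == "" || PySem.Str.len (PySem.Str.strip evidence_text) < 20 then ""
  else
    let evidence_lower := PySem.Str.lower evidence_text
    if trait_name == "demographics" then
      if ["work", "job", "company", "business"].any (fun t => PySem.Str.isIn t evidence_lower) then
        "Professional working in a business environment"
      else if ["student", "school", "university", "college"].any (fun t => PySem.Str.isIn t evidence_lower) then
        "Student or academic professional"
      else
        "Individual with varied background and experience"
    else if trait_name == "goals_and_motivations" then
      if ["want", "need", "goal", "hope", "aim"].any (fun t => PySem.Str.isIn t evidence_lower) then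
        "Focused on achieving specific objectives and meeting personal needs"
      else
        "Motivated by practical outcomes and problem-solving"
    else if trait_name == "challenges_and_frustrations" then
      if ["problem", "issue", "difficult", "hard", "frustrating"].any (fun t => PySem.Str.isIn t evidence_lower) then
        "Faces specific challenges that impact daily activities"
      else
        "Encounters occasional obstacles in workflow"
    else
      "Demonstrates specific patterns and behaviors related to " ++ PySem.Str.replace trait_name "_" " "

-- ===== PORT B =====
-- B's flat module-level rule list of (trait, term, description) triples, in priority order.
def pvRules : List (String × String × String) :=
  [ ("demographics", "work", "Professional working in a business environment"),
    ("demographics", "job", "Professional working in a business environment"),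
    ("demographics", "company", "Professional working in a business environment"),
    ("demographics", "business", "Professional working in a business environment"),
    ("demographics", "student", "Student or academic professional"),
    ("demographics", "school", "Student or academic professional"),
    ("demographics", "university", "Student or academic professional"),
    ("demographics", "college", "Student or academic professional"),
    ("goals_and_motivations", "want", "Focused on achieving specific objectives and meeting personal needs"),
    ("goals_and_motivations", "need", "Focused on achieving specific objectives and meeting personal needs"),
    ("goals_and_motivations", "goal", "Focused on achieving specific objectives and meeting personal needs"),
    ("goals_and_motivations", "hope", "Focused on achieving specific objectives and meeting personal needs"),
    ("goals_and_motivations", "aim", "Focused on achieving specific objectives and meeting personal needs"),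
    ("challenges_and_frustrations", "problem", "Faces specific challenges that impact daily activities"),
    ("challenges_and_frustrations", "issue", "Faces specific challenges that impact daily activities"),
    ("challenges_and_frustrations", "difficult", "Faces specific challenges that impact daily activities"),
    ("challenges_and_frustrations", "hard", "Faces specific challenges that impact daily activities"),
    ("challenges_and_frustrations", "frustrating", "Faces specific challenges that impact daily activities") ]

def pvDefaults : PySem.Dict String String :=
  PySem.Dict.mk
    [ ("demographics", "Individual with varied background and experience"),
      ("goals_and_motivations", "Motivated by practical outcomes and problem-solving"),
      ("challenges_and_frustrations", "Encounters occasional obstacles in workflow") ]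

def generate_evidence_based_description_alt (trait_name : String) (evidence_text : String) (persona_name : String) : String :=
  if evidence_text == "" || PySem.Str.len (PySem.Str.strip evidence_text) < 20 then ""
  else
    match pvDefaults.get? trait_name with
    | none =>
        "Demonstrates specific patterns and behaviors related to " ++ PySem.Str.replace trait_name "_" " "
    | some dflt =>
        let evidence_lower := PySem.Str.lower evidence_text
        -- for trait, term, desc in reversed(_RULES): if matching, overwrite best
        pvRules.reverse.foldl
          (fun best r =>
            if r.1 == trait_name && PySem.Str.isIn r.2.1 evidence_lower then r.2.2 else best)
          dflt

-- ===== PRECONDITION & SPEC =====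
def Spec_generate_evidence_based_description (trait_name : String) (evidence_text : String) (persona_name : String) (out : String) : Prop := out = generate_evidence_based_description_alt trait_name evidence_text persona_name
instance (trait_name : String) (evidence_text : String) (persona_name : String) (out : String) : Decidable (Spec_generate_evidence_based_description trait_name evidence_text persona_name out) := by unfold Spec_generate_evidence_based_description; infer_instance

-- ===== CLAIM (what is proved, stated in full; the proofs are below) =====
def Claim_equal_generate_evidence_based_description : Prop := ∀ (trait_name : String) (evidence_text : String) (persona_name : String), Dom_generate_evidence_based_description trait_name evidence_text persona_name → Spec_generate_evidence_based_description trait_name evidence_text persona_name (generate_evidence_based_description trait_name evidence_text persona_name)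

-- ===== LEMMAS AND PROOFS =====

-- ===== VERDICT (by name: the statement is the Claim_ definition above) =====
theorem generate_evidence_based_description_spec : Claim_equal_generate_evidence_based_description := by
  intro trait_name evidence_text persona_name _
  unfold Spec_generate_evidence_based_description
  unfold generate_evidence_based_description generate_evidence_based_description_alt
  by_cases hg : evidence_text = "" ∨ (PySem.Chars.strip evidence_text.toList).length < 20
  · simp [hg]
  · by_cases h1 : trait_name = "demographics"
    · subst h1
      have hget : pvDefaults.get? "demographics" = some "Individual with varied background and experience" := rfl
      simp [hg, hget, pvRules]
      generalize PySem.Chars.isIn ['w', 'o', 'r', 'k'] (PySem.Chars.lower evidence_text.toList) = b1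
      generalize PySem.Chars.isIn ['j', 'o', 'b'] (PySem.Chars.lower evidence_text.toList) = b2
      generalize PySem.Chars.isIn ['c', 'o', 'm', 'p', 'a', 'n', 'y'] (PySem.Chars.lower evidence_text.toList) = b3
      generalize PySem.Chars.isIn ['b', 'u', 's', 'i', 'n', 'e', 's', 's'] (PySem.Chars.lower evidence_text.toList) = b4
      generalize PySem.Chars.isIn ['s', 't', 'u', 'd', 'e', 'n', 't'] (PySem.Chars.lower evidence_text.toList) = b5
      generalize PySem.Chars.isIn ['s', 'c', 'h', 'o', 'o', 'l'] (PySem.Chars.lower evidence_text.toList) = b6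
      generalize PySem.Chars.isIn ['u', 'n', 'i', 'v', 'e', 'r', 's', 'i', 't', 'y'] (PySem.Chars.lower evidence_text.toList) = b7
      generalize PySem.Chars.isIn ['c', 'o', 'l', 'l', 'e', 'g', 'e'] (PySem.Chars.lower evidence_text.toList) = b8
      revert b1 b2 b3 b4 b5 b6 b7 b8
      decide
    · by_cases h2 : trait_name = "goals_and_motivations"
      · subst h2
        have hget : pvDefaults.get? "goals_and_motivations" = some "Motivated by practical outcomes and problem-solving" := rfl
        simp [hg, hget, pvRules]
        generalize PySem.Chars.isIn ['w', 'a', 'n', 't'] (PySem.Chars.lower evidence_text.toList) = b1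
        generalize PySem.Chars.isIn ['n', 'e', 'e', 'd'] (PySem.Chars.lower evidence_text.toList) = b2
        generalize PySem.Chars.isIn ['g', 'o', 'a', 'l'] (PySem.Chars.lower evidence_text.toList) = b3
        generalize PySem.Chars.isIn ['h', 'o', 'p', 'e'] (PySem.Chars.lower evidence_text.toList) = b4
        generalize PySem.Chars.isIn ['a', 'i', 'm'] (PySem.Chars.lower evidence_text.toList) = b5
        revert b1 b2 b3 b4 b5
        decide
      · by_cases h3 : trait_name = "challenges_and_frustrations"
        · subst h3
          have hget : pvDefaults.get? "challenges_and_frustrations" = some "Encounters occasional obstacles in workflow" := rfl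
          simp [hg, hget, pvRules]
          generalize PySem.Chars.isIn ['p', 'r', 'o', 'b', 'l', 'e', 'm'] (PySem.Chars.lower evidence_text.toList) = b1
          generalize PySem.Chars.isIn ['i', 's', 's', 'u', 'e'] (PySem.Chars.lower evidence_text.toList) = b2
          generalize PySem.Chars.isIn ['d', 'i', 'f', 'f', 'i', 'c', 'u', 'l', 't'] (PySem.Chars.lower evidence_text.toList) = b3
          generalize PySem.Chars.isIn ['h', 'a', 'r', 'd'] (PySem.Chars.lower evidence_text.toList) = b4
          generalize PySem.Chars.isIn ['f', 'r', 'u', 's', 't', 'r', 'a', 't', 'i', 'n', 'g'] (PySem.Chars.lower evidence_text.toList) = b5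
          revert b1 b2 b3 b4 b5
          decide
        · have e1 : ("demographics" == trait_name) = false := by simp [Ne.symm h1]
          have e2 : ("goals_and_motivations" == trait_name) = false := by simp [Ne.symm h2]
          have e3 : ("challenges_and_frustrations" == trait_name) = false := by simp [Ne.symm h3]
          have hget : pvDefaults.get? trait_name = none := by
            unfold pvDefaults
            simp [PySem.Dict.get?, List.find?, e1, e2, e3]
          simp [hg, hget, h1, h2, h3]
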